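-- pv_equiv track=rewrite | github.com/Ant-man74/MMOpt-Gen | geneticAlgo/FECM.py | prefetchStartDatePostReassign
-- ===== SOURCE A (Python) =====
-- def prefetchStartDatePostReassign(Bi, alpha):
--
-- 	Ti = [1]
-- 	decalage = 0
--
-- 	for i in range(1, len(Bi)):
--
-- 		if Bi[i-1][0] != "minus":
-- 			Ti.insert(i,Ti[i-decalage-1] + alpha)
-- 		else:
-- 			decalage += 1
--
-- 	return Ti
-- ===== SOURCE B (Python) =====
-- def prefetchStartDatePostReassign(Bi, alpha):
--     k = sum(1 for row in Bi[:-1] if row[0] != "minus")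
--     return [1 + j * alpha for j in range(k + 1)]
-- ===== Notes on version B (the rewrite author's own statement) =====
-- stated objective: simpler
-- what changed: B replaces the stateful loop (list.insert with a decalage-corrected index) by counting the non-'minus' rows among Bi[:-1] once and emitting the arithmetic sequence 1, 1+alpha, ..., 1+k*alpha directly.
import Mathlib
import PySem

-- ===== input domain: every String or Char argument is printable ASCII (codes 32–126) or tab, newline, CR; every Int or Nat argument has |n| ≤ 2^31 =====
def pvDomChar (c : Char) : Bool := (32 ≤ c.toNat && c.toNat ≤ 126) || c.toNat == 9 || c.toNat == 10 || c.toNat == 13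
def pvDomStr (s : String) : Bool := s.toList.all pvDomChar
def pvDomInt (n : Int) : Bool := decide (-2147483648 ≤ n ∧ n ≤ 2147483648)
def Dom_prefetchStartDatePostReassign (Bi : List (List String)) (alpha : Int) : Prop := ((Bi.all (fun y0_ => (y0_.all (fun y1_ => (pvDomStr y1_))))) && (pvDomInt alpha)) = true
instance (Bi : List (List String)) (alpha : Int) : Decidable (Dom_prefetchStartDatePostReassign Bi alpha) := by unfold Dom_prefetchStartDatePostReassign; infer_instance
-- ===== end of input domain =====

-- B counts the non-"minus" rows once and emits the arithmetic sequence directly (simpler; same return value).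

-- ===== PORT A =====
-- literal transliteration of A: the loop over range(1, len(Bi)) carries (Ti, decalage)
def prefetchStartDatePostReassign (Bi : List (List String)) (alpha : Int) : List Int :=
  let st := (PySem.List.pyRange 1 (Bi.length : Int) 1).foldl
    (fun (st : List Int × Int) (i : Int) =>
      if ((PySem.List.pyGet? ((PySem.List.pyGet? Bi (i - 1)).getD []) 0).getD "") ≠ "minus" then
        (PySem.List.insert st.1 i ((PySem.List.pyGet? st.1 (i - st.2 - 1)).getD 0 + alpha), st.2)
      else
        (st.1, st.2 + 1))
    ([1], 0)
  st.1

-- ===== PORT B =====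
def prefetchStartDatePostReassign_alt (Bi : List (List String)) (alpha : Int) : List Int :=
  let k := (Bi.dropLast.filter (fun row => ((PySem.List.pyGet? row 0).getD "") ≠ "minus")).length
  (List.range (k + 1)).map (fun j : Nat => 1 + (j : Int) * alpha)

-- ===== PRECONDITION & SPEC =====
-- Pre_ excludes exactly the inputs where Python raises IndexError: an empty row among Bi[:-1]
-- (both A's Bi[i-1][0] and B's row[0] raise there).
def Pre_prefetchStartDatePostReassign (Bi : List (List String)) (alpha : Int) : Prop :=
  ∀ row ∈ Bi.dropLast, row ≠ []
instance (Bi : List (List String)) (alpha : Int) : Decidable (Pre_prefetchStartDatePostReassign Bi alpha) := by unfold Pre_prefetchStartDatePostReassign; infer_instance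

def pvWitness_prefetchStartDatePostReassign : List (List String) × Int := ([["x"], ["minus"], ["y", "z"]], 2)

def Spec_prefetchStartDatePostReassign (Bi : List (List String)) (alpha : Int) (out : List Int) : Prop := out = prefetchStartDatePostReassign_alt Bi alpha
instance (Bi : List (List String)) (alpha : Int) (out : List Int) : Decidable (Spec_prefetchStartDatePostReassign Bi alpha out) := by unfold Spec_prefetchStartDatePostReassign; infer_instance

-- ===== CLAIM (what is proved, stated in full; the proofs are below) =====
def Claim_equal_prefetchStartDatePostReassign : Prop := ∀ (Bi : List (List String)) (alpha : Int), Dom_prefetchStartDatePostReassign Bi alpha → Pre_prefetchStartDatePostReassign Bi alpha → Spec_prefetchStartDatePostReassign Bi alpha (prefetchStartDatePostReassign Bi alpha)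

-- ===== LEMMAS AND PROOFS =====

-- Python list.insert clamps: inserting at a position at or past the end appends.
theorem pv_insert_ge_length (xs : List Int) (i : Int) (v : Int) (h : (xs.length : Int) ≤ i) :
    PySem.List.insert xs i v = xs ++ [v] := by
  simp only [PySem.List.insert, PySem.List.sliceIndices]
  have h0 : ¬ i < 0 := by omega
  simp [h0, min_eq_right h]

-- the arithmetic sequence B emits
def pvSeq (alpha : Int) (k : Nat) : List Int :=
  (List.range (k + 1)).map (fun j : Nat => 1 + (j : Int) * alpha)

def pvPred (row : List String) : Bool :=
  ((PySem.List.pyGet? row 0).getD "") ≠ "minus"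

theorem pvSeq_get_last (alpha : Int) (k : Nat) :
    PySem.List.pyGet? (pvSeq alpha k) (k : Int) = some (1 + (k : Int) * alpha) := by
  rw [PySem.List.pyGet?_natCast]
  unfold pvSeq
  rw [List.getElem?_map, List.getElem?_range (Nat.lt_succ_self k)]
  rfl

theorem pvSeq_succ (alpha : Int) (k : Nat) :
    pvSeq alpha (k + 1) = pvSeq alpha k ++ [1 + ((k : Int) + 1) * alpha] := by
  simp [pvSeq, List.range_succ]

theorem pv_loop_inv (Bi : List (List String)) (alpha : Int) :
    ∀ m : Nat, m ≤ Bi.length →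
      ((PySem.List.pyRange 1 ((m : Int) + 1) 1).foldl
        (fun (st : List Int × Int) (i : Int) =>
          if ((PySem.List.pyGet? ((PySem.List.pyGet? Bi (i - 1)).getD []) 0).getD "") ≠ "minus" then
            (PySem.List.insert st.1 i ((PySem.List.pyGet? st.1 (i - st.2 - 1)).getD 0 + alpha), st.2)
          else
            (st.1, st.2 + 1))
        ([1], 0)) =
      (pvSeq alpha ((Bi.take m).countP pvPred), (m : Int) - ((Bi.take m).countP pvPred : Int)) := by
  intro m hm
  induction m with
  | zero =>
      simp [pvSeq]
  | succ m ih =>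
      have hm' : m ≤ Bi.length := Nat.le_of_succ_le hm
      have hmlt : m < Bi.length := hm
      rw [show ((m + 1 : Nat) : Int) + 1 = (((m : Int) + 1) + 1) by push_cast; ring]
      rw [PySem.List.pyRange_one_succ_right (by omega)]
      rw [List.foldl_append]
      rw [ih hm']
      have htake : (Bi.take (m + 1)).countP pvPred =
          (Bi.take m).countP pvPred + (if pvPred Bi[m] then 1 else 0) := by
        rw [List.take_add_one, List.getElem?_eq_getElem hmlt]
        rw [List.countP_append]
        simp [List.countP_cons]
      set c : Nat := (Bi.take m).countP pvPred with hc
      have hcle : c ≤ m := le_trans (List.countP_le_length) (by simp [min_eq_left hm'])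
      simp only [List.foldl_cons, List.foldl_nil]
      have hrow : PySem.List.pyGet? Bi (((m : Int) + 1) - 1) = some Bi[m] := by
        rw [show ((m : Int) + 1) - 1 = (m : Int) by ring, PySem.List.pyGet?_natCast]
        simp [hmlt]
      by_cases hp : pvPred Bi[m]
      · have hp' : ((PySem.List.pyGet? ((PySem.List.pyGet? Bi (((m : Int) + 1) - 1)).getD []) 0).getD "") ≠ "minus" := by
          rw [hrow]
          simpa [pvPred] using hp
        rw [if_pos hp']
        have hidx : ((m : Int) + 1) - ((m : Int) - (c : Int)) - 1 = (c : Int) := by ring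
        rw [hidx, pvSeq_get_last]
        have hlen : ((pvSeq alpha c).length : Int) ≤ (m : Int) + 1 := by
          simp [pvSeq]
          omega
        rw [pv_insert_ge_length _ _ _ hlen]
        rw [htake, if_pos hp]
        simp only [Prod.mk.injEq]
        refine ⟨?_, ?_⟩
        · rw [pvSeq_succ]
          simp only [Option.getD_some, List.append_cancel_left_eq, List.cons.injEq, and_true]
          ring
        · push_cast
          ring
      · have hp' : ¬ ((PySem.List.pyGet? ((PySem.List.pyGet? Bi (((m : Int) + 1) - 1)).getD []) 0).getD "") ≠ "minus" := by
          rw [hrow]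
          simpa [pvPred] using hp
        rw [if_neg hp']
        rw [htake, if_neg hp]
        simp only [Prod.mk.injEq]
        refine ⟨rfl, ?_⟩
        push_cast
        ring

-- ===== VERDICT (by name: the statement is the Claim_ definition above) =====
theorem prefetchStartDatePostReassign_spec : Claim_equal_prefetchStartDatePostReassign := by
  intro Bi alpha _hDom _hPre
  unfold Spec_prefetchStartDatePostReassign prefetchStartDatePostReassign prefetchStartDatePostReassign_alt
  cases hBi : Bi with
  | nil => simp [PySem.List.pyRange_one_eq_nil]
  | cons r rs =>
      have hlen : (r :: rs).length = rs.length + 1 := by simp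
      have h := pv_loop_inv (r :: rs) alpha rs.length (by simp)
      rw [show ((( r :: rs).length : Int)) = ((rs.length : Int) + 1) by simp] at *
      rw [h]
      have hdrop : (r :: rs).dropLast = (r :: rs).take rs.length := by
        rw [List.dropLast_eq_take]
        simp
      rw [hdrop]
      have hfun : (fun row => decide ((PySem.List.pyGet? row 0).getD "" ≠ "minus")) = pvPred := rfl
      simp only [pvSeq, List.countP_eq_length_filter]
      rw [hfun]
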